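-- pv_equiv track=rewrite | github.com/sajedjalil/Data-Science-Pipeline-Detector | dataset/santander-product-recommendation/ilovescience/mass-hashes-playing-around.py | get_next_best_prediction
-- ===== SOURCE A (Python) =====
-- import heapq
--
-- def get_next_best_prediction(best, hashes, predicted, cst):
--
--     score = [0] * 24
--
--     for h in hashes:
--         if h in best:
--             for i in range(len(best[h])):
--                 sc = 24-i + len(h)
--                 index = best[h][i][0]
--                 if cst is not None:
--                     if cst[index] == '1':
--                         continue
--                 if index not in predicted:
--                     score[index] += sc
--
--     final = []
--     pred = heapq.nlargest(24, range(len(score)), score.__getitem__)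
--     for i in range(len(pred)):
--         if score[pred[i]] > 0:
--             final.append(pred[i])
--         if len(final) >= 7:
--             break
--
--     return final
-- ===== SOURCE B (Python) =====
-- def get_next_best_prediction(best, hashes, predicted, cst):
--
--     score = [0] * 24
--
--     for h in hashes:
--         entries = best.get(h)
--         if entries is None:
--             continue
--         bonus = 24 + len(h)
--         for i, entry in enumerate(entries):
--             index = entry[0]
--             if cst is not None and cst[index] == '1':
--                 continue
--             if index not in predicted:
--                 score[index] += bonus - i
--
--     final = []
--     while len(final) < 7:
--         best_idx = -1
--         best_sc = 0
--         for j in range(24):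
--             if j not in final and score[j] > best_sc:
--                 best_idx = j
--                 best_sc = score[j]
--         if best_idx < 0:
--             break
--         final.append(best_idx)
--     return final
-- ===== Notes on version B (the rewrite author's own statement) =====
-- stated objective: alternative
-- what changed: The heapq.nlargest sort-based top-7 selection is replaced by a bounded selection loop: at most 7 passes, each an ascending scan over the 24 scores picking the strictly-greatest positive score not yet taken (strict '>' reproduces nlargest's stable tie-break toward the lower index); the scoring pass uses dict.get/enumerate instead of membership test plus repeated indexing.
import Mathlib
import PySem

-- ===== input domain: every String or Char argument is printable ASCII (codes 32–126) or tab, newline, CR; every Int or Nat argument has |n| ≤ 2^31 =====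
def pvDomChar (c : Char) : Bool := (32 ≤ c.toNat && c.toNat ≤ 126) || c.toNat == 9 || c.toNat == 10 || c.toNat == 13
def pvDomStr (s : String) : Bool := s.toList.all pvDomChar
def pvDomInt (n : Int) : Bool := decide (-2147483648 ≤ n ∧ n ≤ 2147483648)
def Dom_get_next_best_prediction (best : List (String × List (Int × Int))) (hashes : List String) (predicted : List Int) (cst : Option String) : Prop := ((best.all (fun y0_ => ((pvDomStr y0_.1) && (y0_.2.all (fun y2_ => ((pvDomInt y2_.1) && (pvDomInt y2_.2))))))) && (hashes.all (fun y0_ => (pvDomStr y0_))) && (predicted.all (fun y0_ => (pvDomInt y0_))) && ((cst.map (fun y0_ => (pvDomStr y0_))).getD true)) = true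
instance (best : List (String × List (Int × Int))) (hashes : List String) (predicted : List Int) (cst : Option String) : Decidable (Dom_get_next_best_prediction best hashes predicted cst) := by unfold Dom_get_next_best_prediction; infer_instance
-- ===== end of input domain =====

-- B replaces the heapq.nlargest sort-based top-7 selection by at most 7 ascending max-scans over
-- the 24 scores (strict '>' keeps nlargest's stable lower-index tie-break); same cost, alternative algorithm.

-- ===== PORT A =====
-- A's scoring loop: for h in hashes: if h in best: for i in range(len(best[h])): …
def scoreA (best : List (String × List (Int × Int))) (hashes : List String) (predicted : List Int) (cst : Option String) : List Int :=
  hashes.foldl (fun score h =>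
    match List.lookup h best with
    | none => score
    | some entries =>
        (PySem.List.pyRange 0 (PySem.List.len entries) 1).foldl (fun score i =>
          let sc : Int := 24 - i + PySem.Str.len h
          let index : Int := (PySem.List.pyGetD entries i (0, 0)).1
          let proceed : List Int → List Int := fun score =>
            if index ∈ predicted then score
            else PySem.List.pySetD score index (PySem.List.pyGetD score index 0 + sc)
          match cst with
          | some c => if PySem.Str.pyGet? c index = some '1' then score else proceed score
          | none => proceed score) score)
    (List.replicate 24 0)

-- A's final loop: for i in range(len(pred)): if score[pred[i]] > 0: append; if len(final) >= 7: break
def selLoopA (score : List Int) : List Int → List Int → List Int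
  | [], final => final
  | p :: ps, final =>
    let final' := if 0 < PySem.List.pyGetD score p 0 then final ++ [p] else final
    if 7 ≤ final'.length then final' else selLoopA score ps final'

-- heapq.nlargest(24, range(len(score)), score.__getitem__) is ported by its documented contract
-- 'sorted(iterable, key=key, reverse=True)[:24]' (stable descending sort, then take 24).
def get_next_best_prediction (best : List (String × List (Int × Int))) (hashes : List String) (predicted : List Int) (cst : Option String) : List Int :=
  let score := scoreA best hashes predicted cst
  let pred := (PySem.List.sorted (PySem.List.pyRange 0 (PySem.List.len score) 1)
      (fun j => PySem.List.pyGetD score j 0) true).take 24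
  selLoopA score pred []

-- ===== PORT B =====
-- B's scoring loop: entries = best.get(h); bonus = 24 + len(h); for i, entry in enumerate(entries): …
def scoreB (best : List (String × List (Int × Int))) (hashes : List String) (predicted : List Int) (cst : Option String) : List Int :=
  hashes.foldl (fun score h =>
    match List.lookup h best with
    | none => score
    | some entries =>
        let bonus : Int := 24 + PySem.Str.len h
        (PySem.List.enumerate entries 0).foldl (fun score e =>
          let index : Int := e.2.1
          if cst.isSome && (PySem.Str.pyGet? (cst.getD "") index == some '1') then score
          else if index ∈ predicted then score
          else PySem.List.pySetD score index (PySem.List.pyGetD score index 0 + (bonus - e.1))) score)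
    (List.replicate 24 0)

-- one ascending scan over range(24): first index with a strictly greater positive unused score
def scanMaxB (score : List Int) (final : List Int) : Int × Int :=
  (PySem.List.pyRange 0 24 1).foldl (fun acc j =>
    if j ∉ final ∧ acc.2 < PySem.List.pyGetD score j 0 then (j, PySem.List.pyGetD score j 0) else acc)
    (-1, 0)

-- while len(final) < 7: … appends one index per iteration, so 7 units of fuel
def selLoopB (score : List Int) : Nat → List Int → List Int
  | 0, final => final
  | n + 1, final =>
    let r := scanMaxB score final
    if r.1 < 0 then final else selLoopB score n (final ++ [r.1])

def get_next_best_prediction_alt (best : List (String × List (Int × Int))) (hashes : List String) (predicted : List Int) (cst : Option String) : List Int :=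
  selLoopB (scoreB best hashes predicted cst) 7 []

-- ===== PRECONDITION & SPEC =====
-- Pre_ excludes exactly the inputs on which Python A raises an IndexError: an entry index used with
-- cst outside cst's range, or a scored index outside [-24, 24) for the 24-slot score list.
def Pre_get_next_best_prediction (best : List (String × List (Int × Int))) (hashes : List String) (predicted : List Int) (cst : Option String) : Prop :=
  ∀ h ∈ hashes, ∀ e ∈ (List.lookup h best).getD [],
    (∀ c ∈ cst.toList, PySem.Raise.InRange c.toList.length e.1) ∧
    ((∀ c ∈ cst.toList, PySem.Str.pyGet? c e.1 ≠ some '1') → e.1 ∉ predicted →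
      (-24 ≤ e.1 ∧ e.1 < 24))
instance (best : List (String × List (Int × Int))) (hashes : List String) (predicted : List Int) (cst : Option String) : Decidable (Pre_get_next_best_prediction best hashes predicted cst) := by unfold Pre_get_next_best_prediction; infer_instance

def pvWitness_get_next_best_prediction : (List (String × List (Int × Int))) × List String × List Int × Option String :=
  ([("a", [(0, 1), (3, 2)])], ["a", "b"], [5], none)

def Spec_get_next_best_prediction (best : List (String × List (Int × Int))) (hashes : List String) (predicted : List Int) (cst : Option String) (out : List Int) : Prop := out = get_next_best_prediction_alt best hashes predicted cst
instance (best : List (String × List (Int × Int))) (hashes : List String) (predicted : List Int) (cst : Option String) (out : List Int) : Decidable (Spec_get_next_best_prediction best hashes predicted cst out) := by unfold Spec_get_next_best_prediction; infer_instance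

-- ===== CLAIM (what is proved, stated in full; the proofs are below) =====
def Claim_equal_get_next_best_prediction : Prop := ∀ (best : List (String × List (Int × Int))) (hashes : List String) (predicted : List Int) (cst : Option String), Dom_get_next_best_prediction best hashes predicted cst → Pre_get_next_best_prediction best hashes predicted cst → Spec_get_next_best_prediction best hashes predicted cst (get_next_best_prediction best hashes predicted cst)

-- ===== LEMMAS AND PROOFS =====

-- the sort key of index j and the strict 'stable descending' order it induces
def pvKey (s : List Int) (j : Int) : Int := PySem.List.pyGetD s j 0
def pvLex (s : List Int) (a b : Int) : Prop := pvKey s b < pvKey s a ∨ (pvKey s a = pvKey s b ∧ a < b)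

-- the positive-score part of A's stable descending sort of [0..23]
def pvF (s : List Int) : List Int :=
  (PySem.List.sorted (PySem.List.pyRange 0 24 1) (fun j => PySem.List.pyGetD s j 0) true).filter
    (fun p => decide (0 < PySem.List.pyGetD s p 0))

theorem pv_insertBy_perm {α : Type} (b : α → α → Bool) (x : α) : ∀ l : List α, (PySem.List.insertBy b x l).Perm (x :: l) := by
  intro l
  induction l with
  | nil => simp [PySem.List.insertBy]
  | cons y ys ih =>
    by_cases h : b x y = true
    · simp [PySem.List.insertBy, h]
    · simp only [PySem.List.insertBy, h, Bool.false_eq_true, if_false]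
      exact (ih.cons y).trans (List.Perm.swap x y ys)

theorem pv_mem_insertBy {α : Type} (b : α → α → Bool) (x z : α) (l : List α) :
    z ∈ PySem.List.insertBy b x l ↔ z = x ∨ z ∈ l := by
  rw [(pv_insertBy_perm b x l).mem_iff]; simp

theorem pv_pairwise_insertBy (s : List Int) (x : Int) : ∀ l : List Int,
    l.Pairwise (pvLex s) → (∀ y ∈ l, y < x) →
    (PySem.List.insertBy (fun a b => decide (PySem.List.pyGetD s b 0 < PySem.List.pyGetD s a 0)) x l).Pairwise (pvLex s) := by
  intro l
  induction l with
  | nil => intro _ _; simp [PySem.List.insertBy]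
  | cons y ys ih =>
    intro hp hlt
    rcases List.pairwise_cons.mp hp with ⟨hy, hys⟩
    by_cases hb : PySem.List.pyGetD s y 0 < PySem.List.pyGetD s x 0
    · simp only [PySem.List.insertBy, hb, decide_true, if_true]
      refine List.pairwise_cons.mpr ⟨?_, hp⟩
      intro z hz
      rcases List.mem_cons.mp hz with rfl | hz
      · exact Or.inl hb
      · have := hy z hz
        unfold pvLex pvKey at *; omega
    · simp only [PySem.List.insertBy, hb, decide_false, Bool.false_eq_true, if_false]
      refine List.pairwise_cons.mpr ⟨?_, ih hys (fun a ha => hlt a (List.mem_cons_of_mem y ha))⟩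
      intro z hz
      rcases (pv_mem_insertBy (fun a b => decide (PySem.List.pyGetD s b 0 < PySem.List.pyGetD s a 0)) x z ys).mp hz with heq | hz
      · have hyx : y < x := hlt y (List.mem_cons_self ..)
        rw [heq]
        unfold pvLex pvKey at *; omega
      · exact hy z hz

theorem pv_foldl_insert_pairwise (s : List Int) : ∀ (xs acc : List Int),
    xs.Pairwise (· < ·) → acc.Pairwise (pvLex s) → (∀ a ∈ acc, ∀ x ∈ xs, a < x) →
    (xs.foldl (fun acc x => PySem.List.insertBy (fun a b => decide (PySem.List.pyGetD s b 0 < PySem.List.pyGetD s a 0)) x acc) acc).Pairwise (pvLex s) := by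
  intro xs
  induction xs with
  | nil => intro acc _ h _; exact h
  | cons x xs ih =>
    intro acc hxs hacc hcross
    rcases List.pairwise_cons.mp hxs with ⟨hx, hxs'⟩
    rw [List.foldl_cons]
    apply ih _ hxs'
    · exact pv_pairwise_insertBy s x acc hacc (fun y hy => hcross y hy x (List.mem_cons_self ..))
    · intro a ha z hz
      rcases (pv_mem_insertBy _ x a acc).mp ha with rfl | ha
      · exact hx z hz
      · exact hcross a ha z (List.mem_cons_of_mem x hz)

theorem pv_sorted_pairwise (s : List Int) (xs : List Int) (hxs : xs.Pairwise (· < ·)) :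
    (PySem.List.sorted xs (fun j => PySem.List.pyGetD s j 0) true).Pairwise (pvLex s) := by
  unfold PySem.List.sorted
  simp only
  exact pv_foldl_insert_pairwise s xs [] hxs (by simp) (by simp)

theorem pv_memF (s : List Int) (j : Int) :
    j ∈ pvF s ↔ (0 ≤ j ∧ j < 24 ∧ 0 < pvKey s j) := by
  unfold pvF pvKey
  rw [List.mem_filter]
  rw [(PySem.List.sorted_perm _ _ _).mem_iff, PySem.List.mem_pyRange_one]
  simp; tauto

theorem pv_F_pairwise (s : List Int) : (pvF s).Pairwise (pvLex s) := by
  exact (pv_sorted_pairwise s _ (PySem.List.pairwise_lt_pyRange_one 0 24)).filter _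

theorem pv_F_nodup (s : List Int) : (pvF s).Nodup := by
  exact (((PySem.List.sorted_perm _ _ _).nodup_iff).mpr (PySem.List.nodup_pyRange_one 0 24)).filter _

theorem pv_scan_partial (s : List Int) (final : List Int) : ∀ n : Nat,
    (((PySem.List.pyRange 0 (n : Int) 1).foldl (fun acc j =>
        if j ∉ final ∧ acc.2 < PySem.List.pyGetD s j 0 then (j, PySem.List.pyGetD s j 0) else acc)
        (-1, 0) = ((-1 : Int), (0 : Int)))
      ∧ ∀ j : Int, 0 ≤ j → j < n → j ∉ final → pvKey s j ≤ 0)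
  ∨ (∃ m : Int, (PySem.List.pyRange 0 (n : Int) 1).foldl (fun acc j =>
        if j ∉ final ∧ acc.2 < PySem.List.pyGetD s j 0 then (j, PySem.List.pyGetD s j 0) else acc)
        (-1, 0) = (m, pvKey s m)
      ∧ 0 ≤ m ∧ m < n ∧ m ∉ final ∧ 0 < pvKey s m
      ∧ ∀ j : Int, 0 ≤ j → j < n → j ∉ final → 0 < pvKey s j → j = m ∨ pvLex s m j) := by
  intro n
  induction n with
  | zero =>
    left
    constructor
    · rw [PySem.List.pyRange_one_eq_nil (by norm_num)]; rfl
    · intro j h1 h2; omega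
  | succ n ih =>
    have hsplit : PySem.List.pyRange 0 ((n + 1 : Nat) : Int) 1
        = PySem.List.pyRange 0 (n : Int) 1 ++ [(n : Int)] := by
      push_cast
      exact PySem.List.pyRange_one_succ_right (by positivity)
    rw [hsplit, List.foldl_append]
    rcases ih with ⟨heq, hnone⟩ | ⟨m, heq, h0, hn, hf, hpos, hmin⟩
    · rw [heq]
      by_cases hc : (n : Int) ∉ final ∧ (0 : Int) < PySem.List.pyGetD s (n : Int) 0
      · right
        refine ⟨(n : Int), ?_, by positivity, by push_cast; omega, hc.1, hc.2, ?_⟩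
        · simp only [List.foldl_cons, List.foldl_nil, if_pos hc]; rfl
        · intro j h1 h2 h3 h4
          by_cases hj : j < (n : Int)
          · exact absurd h4 (by have := hnone j h1 hj h3; unfold pvKey at *; omega)
          · left; push_cast at h2; omega
      · left
        constructor
        · simp only [List.foldl_cons, List.foldl_nil, if_neg hc]
        · intro j h1 h2 h3
          by_cases hj : j < (n : Int)
          · exact hnone j h1 hj h3
          · have hjn : j = (n : Int) := by push_cast at h2; omega
            subst hjn
            unfold pvKey
            rcases Decidable.not_and_iff_not_or_not.mp hc with h | h
            · exact absurd h3 (by simpa using h)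
            · omega
    · rw [heq]
      by_cases hc : (n : Int) ∉ final ∧ pvKey s m < PySem.List.pyGetD s (n : Int) 0
      · right
        refine ⟨(n : Int), ?_, by positivity, by push_cast; omega, hc.1, ?_, ?_⟩
        · simp only [List.foldl_cons, List.foldl_nil]
          rw [if_pos hc]; rfl
        · unfold pvKey at *; omega
        · intro j h1 h2 h3 h4
          by_cases hj : j < (n : Int)
          · rcases hmin j h1 hj h3 h4 with rfl | hlex
            · right; left; exact hc.2
            · right; left
              unfold pvLex pvKey at *; omega
          · left; push_cast at h2; omega
      · right
        refine ⟨m, ?_, h0, by push_cast; omega, hf, hpos, ?_⟩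
        · simp only [List.foldl_cons, List.foldl_nil]
          rw [if_neg hc]
        · intro j h1 h2 h3 h4
          by_cases hj : j < (n : Int)
          · exact hmin j h1 hj h3 h4
          · have hjn : j = (n : Int) := by push_cast at h2; omega
            subst hjn
            right
            rcases Decidable.not_and_iff_not_or_not.mp hc with h | h
            · exact absurd h3 (by simpa using h)
            · unfold pvLex pvKey at *; omega

theorem pv_notmem_take (s : List Int) (m k : Nat) (hk : k < (pvF s).length) (hmk : m ≤ k) :
    (pvF s)[k] ∉ (pvF s).take m := by
  intro hmem
  rcases List.mem_iff_getElem.mp hmem with ⟨k', hk', hkeq⟩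
  rw [List.getElem_take] at hkeq
  have hkm : k' < m := by have := hk'; simp [List.length_take] at this; omega
  have := ((pv_F_nodup s).getElem_inj_iff).mp hkeq
  omega

theorem pv_cand_iff (s : List Int) (m : Nat) (hm : m ≤ (pvF s).length) (j : Int) :
    (0 ≤ j ∧ j < 24 ∧ 0 < pvKey s j ∧ j ∉ (pvF s).take m) ↔
    (∃ (k : Nat) (_ : k < (pvF s).length), m ≤ k ∧ (pvF s)[k] = j) := by
  constructor
  · rintro ⟨h0, h24, hpos, hnt⟩
    have hjF : j ∈ pvF s := (pv_memF s j).mpr ⟨h0, h24, hpos⟩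
    rcases List.mem_iff_getElem.mp hjF with ⟨k, hk, hkeq⟩
    refine ⟨k, hk, ?_, hkeq⟩
    by_contra hlt
    push_neg at hlt
    apply hnt
    have hklen : k < ((pvF s).take m).length := by simp [List.length_take]; omega
    have hje : ((pvF s).take m)[k]'hklen = j := by rw [List.getElem_take]; exact hkeq
    rw [← hje]
    exact List.getElem_mem hklen
  · rintro ⟨k, hk, hmk, hkeq⟩
    have hjF : (pvF s)[k] ∈ pvF s := List.getElem_mem hk
    rcases (pv_memF s _).mp hjF with ⟨h0, h24, hpos⟩
    rw [← hkeq]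
    exact ⟨h0, h24, hpos, pv_notmem_take s m k hk hmk⟩

theorem pv_scanMaxB_partial (s : List Int) (final : List Int) :
    scanMaxB s final = (PySem.List.pyRange 0 ((24 : Nat) : Int) 1).foldl (fun acc j =>
      if j ∉ final ∧ acc.2 < PySem.List.pyGetD s j 0 then (j, PySem.List.pyGetD s j 0) else acc)
      (-1, 0) := by
  norm_num [scanMaxB]

theorem pv_scan_eq_none (s : List Int) (m : Nat) (hm : (pvF s).length ≤ m) :
    scanMaxB s ((pvF s).take m) = (-1, 0) := by
  rw [List.take_of_length_le hm, pv_scanMaxB_partial]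
  rcases pv_scan_partial s (pvF s) 24 with ⟨heq, _⟩ | ⟨m', heq, h0, h24, hnf, hpos, _⟩
  · exact heq
  · exfalso
    have : (0 ≤ m' ∧ m' < 24 ∧ 0 < pvKey s m' ∧ m' ∉ (pvF s).take (pvF s).length) := by
      rw [List.take_length]; exact ⟨h0, by exact_mod_cast h24, hpos, hnf⟩
    rcases (pv_cand_iff s (pvF s).length le_rfl m').mp this with ⟨k, hk, hmk, _⟩
    omega

theorem pv_scan_eq_get (s : List Int) (m : Nat) (hm : m < (pvF s).length) :
    scanMaxB s ((pvF s).take m) = ((pvF s)[m], pvKey s ((pvF s)[m])) := by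
  have hmle : m ≤ (pvF s).length := le_of_lt hm
  have hcm : 0 ≤ (pvF s)[m] ∧ (pvF s)[m] < 24 ∧ 0 < pvKey s ((pvF s)[m]) ∧ (pvF s)[m] ∉ (pvF s).take m :=
    (pv_cand_iff s m hmle _).mpr ⟨m, hm, le_rfl, rfl⟩
  rw [pv_scanMaxB_partial]
  rcases pv_scan_partial s ((pvF s).take m) 24 with ⟨_, hnone⟩ | ⟨m', heq, h0, h24, hnf, hpos, hmin⟩
  · exfalso
    have := hnone ((pvF s)[m]) hcm.1 (by exact_mod_cast hcm.2.1) hcm.2.2.2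
    have := hcm.2.2.1
    omega
  · rcases (pv_cand_iff s m hmle m').mp ⟨h0, by exact_mod_cast h24, hpos, hnf⟩ with ⟨k, hk, hmk, hkeq⟩
    have him : m' = (pvF s)[m] := by
      by_cases hkm : k = m
      · subst hkm; exact hkeq.symm
      · have hlex1 : pvLex s ((pvF s)[m]) m' := by
          rw [← hkeq]
          exact (List.pairwise_iff_getElem.mp (pv_F_pairwise s)) m k hm hk (by omega)
        rcases hmin ((pvF s)[m]) hcm.1 (by exact_mod_cast hcm.2.1) hcm.2.2.2 hcm.2.2.1 with heq2 | hlex2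
        · exact heq2.symm
        · exfalso; unfold pvLex at hlex1 hlex2; omega
    rw [heq, him]

theorem pv_selLoopB_take (s : List Int) : ∀ (n m : Nat), m ≤ (pvF s).length →
    selLoopB s n ((pvF s).take m) = (pvF s).take (m + n) := by
  intro n
  induction n with
  | zero => intro m _; rfl
  | succ n ih =>
    intro m hm
    rcases lt_or_eq_of_le hm with hlt | heq
    · rw [selLoopB, pv_scan_eq_get s m hlt]
      have h0m : 0 ≤ (pvF s)[m] := ((pv_memF s _).mp (List.getElem_mem hlt)).1
      have hnneg : ¬ (((pvF s)[m], pvKey s ((pvF s)[m])).1 < 0) := by dsimp only; omega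
      rw [if_neg hnneg]
      have htake : (pvF s).take m ++ [(pvF s)[m]] = (pvF s).take (m + 1) := by
        rw [List.take_succ, List.getElem?_eq_getElem hlt]
        rfl
      rw [htake, ih (m + 1) (by omega)]
      congr 1
      omega
    · rw [selLoopB, pv_scan_eq_none s m (le_of_eq heq.symm)]
      rw [if_pos (by norm_num)]
      rw [List.take_of_length_le (le_of_eq heq.symm), List.take_of_length_le (by omega)]

theorem pv_selLoopA_eq (s : List Int) : ∀ (ps acc : List Int), acc.length < 7 →
    selLoopA s ps acc = acc ++ (ps.filter (fun p => decide (0 < PySem.List.pyGetD s p 0))).take (7 - acc.length) := by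
  intro ps
  induction ps with
  | nil => intro acc _; simp [selLoopA]
  | cons p ps ih =>
    intro acc hacc
    rw [selLoopA]
    by_cases hp : 0 < PySem.List.pyGetD s p 0
    · rw [List.filter_cons_of_pos (by simpa using hp)]
      simp only [if_pos hp]
      by_cases h7 : 7 ≤ (acc ++ [p]).length
      · rw [if_pos h7]
        have hlen : acc.length = 6 := by simp at h7; omega
        rw [hlen]
        norm_num
      · rw [if_neg h7]
        rw [ih (acc ++ [p]) (by simp at h7 ⊢; omega)]
        have h1 : 7 - acc.length = (7 - (acc ++ [p]).length) + 1 := by simp; omega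
        rw [h1, List.take_succ_cons, List.append_assoc]
        rfl
    · rw [List.filter_cons_of_neg (by simpa using hp)]
      simp only [if_neg hp]
      rw [if_neg (by simp at hacc ⊢; omega)]
      exact ih acc hacc

theorem pv_selection_eq (s : List Int) (hlen : s.length = 24) :
    selLoopA s ((PySem.List.sorted (PySem.List.pyRange 0 (PySem.List.len s) 1)
      (fun j => PySem.List.pyGetD s j 0) true).take 24) [] = selLoopB s 7 [] := by
  have h1 : PySem.List.len s = (24 : Int) := by
    rw [PySem.List.len_eq, hlen]; norm_num
  rw [h1]
  have hPlen : (PySem.List.sorted (PySem.List.pyRange 0 24 1)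
      (fun j => PySem.List.pyGetD s j 0) true).length = 24 := by
    rw [PySem.List.length_sorted, PySem.List.length_pyRange_one]
    decide
  rw [List.take_of_length_le (le_of_eq hPlen)]
  rw [pv_selLoopA_eq s _ [] (by norm_num)]
  have h2 : ([] : List Int) = (pvF s).take 0 := rfl
  rw [List.nil_append, h2, pv_selLoopB_take s 7 0 (Nat.zero_le _)]
  rfl

theorem pv_score_eq (best : List (String × List (Int × Int))) (hashes : List String) (predicted : List Int) (cst : Option String) :
    scoreA best hashes predicted cst = scoreB best hashes predicted cst := by
  unfold scoreA scoreB
  apply List.foldl_ext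
  intro score h _
  cases hlk : List.lookup h best with
  | none => rfl
  | some entries =>
    dsimp only
    rw [PySem.List.enumerate_eq_map_pyRange entries ((0 : Int), (0 : Int)), List.foldl_map]
    apply List.foldl_ext
    intro sc i _
    cases cst with
    | none =>
      simp only [Option.isSome_none, Bool.false_and, Bool.false_eq_true, if_false]
      have harith : 24 - i + PySem.Str.len h = 24 + PySem.Str.len h - i := by omega
      rw [harith]
    | some c =>
      simp only [Option.isSome_some, Bool.true_and, Option.getD_some, beq_iff_eq]
      have harith : 24 - i + PySem.Str.len h = 24 + PySem.Str.len h - i := by omega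
      rw [harith]

theorem pv_foldl_len {α : Type} (f : List Int → α → List Int) (l : List α) (init : List Int)
    (h : ∀ s x, (f s x).length = s.length) : (l.foldl f init).length = init.length := by
  induction l generalizing init with
  | nil => rfl
  | cons x xs ih => rw [List.foldl_cons, ih, h]

theorem pv_score_len (best : List (String × List (Int × Int))) (hashes : List String) (predicted : List Int) (cst : Option String) :
    (scoreB best hashes predicted cst).length = 24 := by
  unfold scoreB
  rw [pv_foldl_len]
  · simp
  · intro sc h
    cases List.lookup h best with
    | none => rfl
    | some entries =>
      simp only
      rw [pv_foldl_len]
      intro sc' e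
      split_ifs <;> simp [PySem.List.length_pySetD]

-- ===== VERDICT (by name: the statement is the Claim_ definition above) =====
theorem get_next_best_prediction_spec : Claim_equal_get_next_best_prediction := by
  intro best hashes predicted cst _ _
  unfold Spec_get_next_best_prediction get_next_best_prediction get_next_best_prediction_alt
  rw [pv_score_eq best hashes predicted cst]
  exact pv_selection_eq _ (pv_score_len best hashes predicted cst)
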